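-- pv_equiv track=rewrite | github.com/OpenSourceEBike/EBike_EScooter_modular_DIY | test_ble_jbdbms_micropython/bms_jbd.py | _frame_ok
-- ===== SOURCE A (Python) =====
-- def _frame_ok(f):
--     """
--     Validate by checksum. Some firmwares are finicky with which prefix is
--     included in the sum; we allow a few plausible start offsets (0..3) and
--     end positions (len-3 or len-4) to tolerate edge conditions while still
--     guaranteeing the final 16-bit sum matches the received checksum.
--     """
--     if (not f) or (len(f) < 7) or (f[0] != 0xDD) or (f[-1] != 0x77):
--         return False
--     recv = (f[-3] << 8) | f[-2]
--     n = len(f)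
--
--     def ok(start, end_excl):
--         if end_excl <= start:
--             return False
--         s = 0
--         for b in f[start:end_excl]:
--             s = (s + b) & 0xFFFF
--         calc = (0x10000 - s) & 0xFFFF
--         return calc == recv
--
--     for st in (0, 1, 2, 3):
--         for en in (n - 3, n - 4):
--             if ok(st, en):
--                 return True
--     return False
-- ===== SOURCE B (Python) =====
-- def _frame_ok(f):
--     # One builtin sum() over the checksum region, then per-offset adjustments
--     # of the running sum instead of re-summing a slice for each offset pair.
--     n = len(f)
--     if n < 7 or f[0] != 0xDD or f[-1] != 0x77:
--         return False
--     recv = (f[-3] << 8) | f[-2]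
--     s = sum(f[:n - 3])          # region for st = 0, en = n - 3
--     for st in range(4):
--         if st:
--             s -= f[st - 1]      # drop one leading byte: s = sum(f[st:n-3])
--         if (-s) % 0x10000 == recv:
--             return True
--         if st < n - 4 and (-(s - f[n - 4])) % 0x10000 == recv:
--             return True
--     return False
-- ===== Notes on version B (the rewrite author's own statement) =====
-- stated objective: alternative
-- what changed: Replaced the eight independent slice-summing passes (one per tried start/end offset pair) by a single builtin sum() over the checksum region plus a constant number of running-sum adjustments per offset pair, comparing with Python's % instead of a masked accumulation loop.
import Mathlib
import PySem

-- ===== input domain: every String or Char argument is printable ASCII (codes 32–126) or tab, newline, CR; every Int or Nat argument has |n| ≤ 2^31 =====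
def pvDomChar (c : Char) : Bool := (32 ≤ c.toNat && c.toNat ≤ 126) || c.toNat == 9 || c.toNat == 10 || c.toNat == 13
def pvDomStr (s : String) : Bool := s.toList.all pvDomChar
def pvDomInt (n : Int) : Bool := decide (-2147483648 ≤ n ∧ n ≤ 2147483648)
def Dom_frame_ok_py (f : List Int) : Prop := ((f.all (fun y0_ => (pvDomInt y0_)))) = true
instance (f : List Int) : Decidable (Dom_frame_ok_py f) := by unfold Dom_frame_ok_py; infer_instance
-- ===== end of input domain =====

-- B replaces A's eight slice-summing passes by one running sum adjusted per tried offset (objective: alternative).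

-- ===== PORT A =====
-- helper `ok(start, end_excl)`: Python's running `s = (s + b) & 0xFFFF` over f[start:end_excl], then compare
def frameOkAux (f : List Int) (recv st en : Int) : Bool :=
  if en ≤ st then false
  else
    let s := (PySem.List.slice f (some st) (some en)).foldl
      (fun s b => PySem.Int.band (s + b) 0xFFFF) 0
    PySem.Int.band (0x10000 - s) 0xFFFF == recv

def frame_ok_py (f : List Int) : Bool :=
  if f.isEmpty || decide (f.length < 7) || !(PySem.List.pyGet? f 0 == some 0xDD)
      || !(PySem.List.pyGet? f (-1) == some 0x77) then false
  else
    -- f[-3], f[-2] are in range here (len ≥ 7), so the `.getD 0` default is never used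
    let recv := PySem.Int.bor (((PySem.List.pyGet? f (-3)).getD 0) <<< 8)
      ((PySem.List.pyGet? f (-2)).getD 0)
    let n : Int := f.length
    ([0, 1, 2, 3] : List Int).any fun st =>
      ([n - 3, n - 4] : List Int).any fun en => frameOkAux f recv st en

-- ===== PORT B =====
-- Source B's for-loop over st = 0..3 with early returns, carrying the running sum s
def altLoop (f : List Int) (recv : Int) (n : Nat) : List Nat → Int → Bool
  | [], _ => false
  | st :: rest, s =>
    let s := if st ≠ 0 then s - (PySem.List.pyGet? f ((st : Int) - 1)).getD 0 else s
    if PySem.Int.mod (-s) 0x10000 == recv then true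
    else if decide (st < n - 4)
        && (PySem.Int.mod (-(s - (PySem.List.pyGet? f ((n : Int) - 4)).getD 0)) 0x10000 == recv) then
      true
    else altLoop f recv n rest s

def frame_ok_py_alt (f : List Int) : Bool :=
  let n := f.length
  if decide (n < 7) || !(PySem.List.pyGet? f 0 == some 0xDD)
      || !(PySem.List.pyGet? f (-1) == some 0x77) then false
  else
    -- f[-3], f[-2], f[st-1], f[n-4] are in range here (len ≥ 7), so `.getD 0` is never used
    let recv := PySem.Int.bor (((PySem.List.pyGet? f (-3)).getD 0) <<< 8)
      ((PySem.List.pyGet? f (-2)).getD 0)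
    let s := (PySem.List.slice f none (some ((n : Int) - 3))).sum
    altLoop f recv n (List.range 4) s

-- ===== PRECONDITION & SPEC =====
def Spec_frame_ok_py (f : List Int) (out : Bool) : Prop := out = frame_ok_py_alt f
instance (f : List Int) (out : Bool) : Decidable (Spec_frame_ok_py f out) := by unfold Spec_frame_ok_py; infer_instance

-- ===== CLAIM (what is proved, stated in full; the proofs are below) =====
def Claim_equal_frame_ok_py : Prop := ∀ (f : List Int), Dom_frame_ok_py f → Spec_frame_ok_py f (frame_ok_py f)

-- ===== LEMMAS AND PROOFS =====

-- Python's `x & 0xFFFF` is `x % 0x10000` (floor mod), for every integer x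
theorem band_mask (a : Int) : PySem.Int.band a 0xFFFF = a % 65536 := by
  unfold PySem.Int.band
  have hmask : ((0xFFFF : Int).toNat) = 2 ^ 16 - 1 := rfl
  by_cases h1 : (0 : Int) ≤ a
  · rw [if_pos h1, if_pos (by norm_num), hmask, Nat.and_two_pow_sub_one_eq_mod]
    omega
  · rw [if_neg h1, if_pos (by norm_num), hmask, Nat.and_comm,
        Nat.and_two_pow_sub_one_eq_mod]
    omega

theorem band_fun_eq :
    (fun s b : Int => PySem.Int.band (s + b) 0xFFFF) = (fun s b : Int => (s + b) % 65536) :=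
  funext fun _ => funext fun _ => band_mask _

-- A's masked running sum equals the plain sum taken mod 2^16
theorem foldl_mask (l : List Int) (a : Int) :
    l.foldl (fun s b : Int => (s + b) % 65536) (a % 65536) = (a + l.sum) % 65536 := by
  induction l generalizing a with
  | nil => simp
  | cons b l ih =>
    simp only [List.foldl_cons, List.sum_cons]
    rw [show (a % 65536 + b) % 65536 = (a + b) % 65536 by omega, ih (a + b)]
    omega

theorem sum_take_sub (f : List Int) (s e : Nat) (hse : s ≤ e) :
    ((f.drop s).take (e - s)).sum = (f.take e).sum - (f.take s).sum := by
  have h : f.take e = f.take s ++ (f.drop s).take (e - s) := by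
    rw [← List.take_add]; congr 1; omega
  rw [h, List.sum_append]; ring

theorem sum_take_succ' (f : List Int) (k : Nat) (hk : k < f.length) :
    (f.take (k + 1)).sum = (f.take k).sum + (f[k]?.getD 0) := by
  rw [List.take_add_one, List.sum_append, List.getElem?_eq_getElem hk]
  simp

-- A's per-offset slice check, written as one floor-mod test on the plain prefix sums
theorem aux_val (f : List Int) (recv : Int) (stI enI : Int) (st en : Nat)
    (hstI : stI = (st : Int)) (henI : enI = (en : Int))
    (h : st < en) (hen : en ≤ f.length) :
    frameOkAux f recv stI enI
      = (PySem.Int.mod (-((f.take en).sum - (f.take st).sum)) 0x10000 == recv) := by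
  subst hstI henI
  unfold frameOkAux
  rw [if_neg (by exact_mod_cast not_le.mpr h)]
  have hs : (PySem.List.slice f (some (st : Int)) (some (en : Int))).foldl
      (fun s b => PySem.Int.band (s + b) 0xFFFF) 0
      = (((f.take en).sum - (f.take st).sum)) % 65536 := by
    rw [PySem.List.slice_natCast, band_fun_eq, show (0 : Int) = 0 % 65536 by norm_num,
        foldl_mask, sum_take_sub f st en (le_of_lt h)]
    omega
  rw [hs, PySem.Int.mod_eq_emod_of_pos (by norm_num)]
  simp only []
  congr 1
  rw [band_mask]
  omega

theorem aux4_val (f : List Int) (recv : Int) (stI : Int) (st : Nat)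
    (hstI : stI = (st : Int)) (hn : 7 ≤ f.length) :
    frameOkAux f recv stI ((f.length : Int) - 4)
      = (decide (st < f.length - 4)
          && (PySem.Int.mod (-((f.take (f.length - 4)).sum - (f.take st).sum)) 0x10000 == recv)) := by
  subst hstI
  have e4 : ((f.length : Int) - 4) = ((f.length - 4 : Nat) : Int) := by omega
  rw [e4]
  by_cases h : st < f.length - 4
  · rw [aux_val f recv _ _ st (f.length - 4) rfl rfl h (by omega), decide_eq_true h,
        Bool.true_and]
  · unfold frameOkAux
    rw [if_pos (by exact_mod_cast not_lt.mp h), decide_eq_false h, Bool.false_and]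

-- ===== VERDICT (by name: the statement is the Claim_ definition above) =====
theorem frame_ok_py_spec : Claim_equal_frame_ok_py := by
  intro f _
  unfold Spec_frame_ok_py frame_ok_py frame_ok_py_alt
  by_cases h7 : f.length < 7
  · simp [h7]
  · have hne : f.isEmpty = false := by
      cases f with
      | nil => simp at h7
      | cons a l => rfl
    simp only [hne, decide_eq_false h7, Bool.false_or]
    by_cases hg : (!(PySem.List.pyGet? f 0 == some 0xDD)
        || !(PySem.List.pyGet? f (-1) == some 0x77)) = true
    · rw [if_pos hg, if_pos hg]
    · rw [if_neg hg, if_neg hg]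
      have hn : 7 ≤ f.length := le_of_not_gt h7
      have e3 : ((f.length : Int) - 3) = ((f.length - 3 : Nat) : Int) := by omega
      -- the initial sum: s0 = sum of f[:n-3]
      have hs0 : (PySem.List.slice f none (some ((f.length : Int) - 3))).sum
          = (f.take (f.length - 3)).sum := by
        rw [e3, PySem.List.slice_to_natCast]
      -- prefix-sum facts used to justify the running-sum adjustments
      have hg0 : (f.take 1).sum = (f.take 0).sum + (f[0]?.getD 0) := sum_take_succ' f 0 (by omega)
      have hg1 : (f.take 2).sum = (f.take 1).sum + (f[1]?.getD 0) := sum_take_succ' f 1 (by omega)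
      have hg2 : (f.take 3).sum = (f.take 2).sum + (f[2]?.getD 0) := sum_take_succ' f 2 (by omega)
      have hg4 : (f.take (f.length - 3)).sum
          = (f.take (f.length - 4)).sum + (f[f.length - 4]?.getD 0) := by
        have := sum_take_succ' f (f.length - 4) (by omega)
        rw [show f.length - 4 + 1 = f.length - 3 by omega] at this
        exact this
      rw [show List.range 4 = [0, 1, 2, 3] from rfl]
      simp only [List.any_cons, List.any_nil, Bool.or_false]
      rw [e3,
          aux_val f _ _ _ 0 (f.length - 3) (by norm_num) rfl (by omega) (by omega),
          aux_val f _ _ _ 1 (f.length - 3) (by norm_num) rfl (by omega) (by omega),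
          aux_val f _ _ _ 2 (f.length - 3) (by norm_num) rfl (by omega) (by omega),
          aux_val f _ _ _ 3 (f.length - 3) (by norm_num) rfl (by omega) (by omega),
          aux4_val f _ _ 0 (by norm_num) hn, aux4_val f _ _ 1 (by norm_num) hn,
          aux4_val f _ _ 2 (by norm_num) hn, aux4_val f _ _ 3 (by norm_num) hn]
      have p0 : PySem.List.pyGet? f (0 : Int) = f[0]? := by
        exact_mod_cast PySem.List.pyGet?_natCast f 0
      have p1 : PySem.List.pyGet? f (1 : Int) = f[1]? := by
        exact_mod_cast PySem.List.pyGet?_natCast f 1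
      have p2 : PySem.List.pyGet? f (2 : Int) = f[2]? := by
        exact_mod_cast PySem.List.pyGet?_natCast f 2
      have p4 : PySem.List.pyGet? f ((f.length : Int) - 4) = f[f.length - 4]? := by
        rw [show ((f.length : Int) - 4) = ((f.length - 4 : Nat) : Int) by omega]
        exact PySem.List.pyGet?_natCast f _
      have t0 : (List.take 0 f).sum = 0 := by simp
      simp only [altLoop]
      norm_num
      rw [p0, p1, p2, p4]
      rw [show (f[f.length - 4]?.getD 0 - (List.take (f.length - 3) f).sum)
            = -(List.take (f.length - 4) f).sum by omega,
          show (f[0]?.getD 0 - (List.take (f.length - 3) f).sum)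
            = ((List.take 1 f).sum - (List.take (f.length - 3) f).sum) by omega,
          show (f[f.length - 4]?.getD 0 - ((List.take (f.length - 3) f).sum - f[0]?.getD 0))
            = ((List.take 1 f).sum - (List.take (f.length - 4) f).sum) by omega,
          show (f[1]?.getD 0 - ((List.take (f.length - 3) f).sum - f[0]?.getD 0))
            = ((List.take 2 f).sum - (List.take (f.length - 3) f).sum) by omega,
          show (f[f.length - 4]?.getD 0 - ((List.take (f.length - 3) f).sum - f[0]?.getD 0 - f[1]?.getD 0))
            = ((List.take 2 f).sum - (List.take (f.length - 4) f).sum) by omega,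
          show (f[2]?.getD 0 - ((List.take (f.length - 3) f).sum - f[0]?.getD 0 - f[1]?.getD 0))
            = ((List.take 3 f).sum - (List.take (f.length - 3) f).sum) by omega,
          show (f[f.length - 4]?.getD 0
                - ((List.take (f.length - 3) f).sum - f[0]?.getD 0 - f[1]?.getD 0 - f[2]?.getD 0))
            = ((List.take 3 f).sum - (List.take (f.length - 4) f).sum) by omega]
      simp only [Bool.beq_eq_decide_eq, Bool.or_assoc]
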